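-- pv_equiv track=rewrite | github.com/taka3693/-agent-os | ops/action_queue.py | build_action_queue
-- ===== SOURCE A (Python) =====
-- from typing import Any, Dict, Iterable, List, Optional
--
-- AUTO_ALLOWED = "auto_allowed"
--
-- APPROVAL_REQUIRED = "approval_required"
--
-- FORBIDDEN = "forbidden"
--
-- def build_action_queue(
--     actions: Optional[Iterable[Dict[str, Any]]],
-- ) -> Dict[str, List[Dict[str, Any]]]:
--     queue: Dict[str, List[Dict[str, Any]]] = {
--         AUTO_ALLOWED: [],
--         APPROVAL_REQUIRED: [],
--         FORBIDDEN: [],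
--     }
--
--     for row in actions or []:
--         item = dict(row)
--         policy = str(item.get("policy") or "").strip()
--
--         if policy == AUTO_ALLOWED:
--             queue[AUTO_ALLOWED].append(item)
--         elif policy == APPROVAL_REQUIRED:
--             queue[APPROVAL_REQUIRED].append(item)
--         else:
--             queue[FORBIDDEN].append(item)
--
--     return queue
-- ===== SOURCE B (Python) =====
-- from typing import Any, Dict, Iterable, List, Optional
--
-- AUTO_ALLOWED = "auto_allowed"
--
-- APPROVAL_REQUIRED = "approval_required"
--
-- FORBIDDEN = "forbidden"
--
--
-- def build_action_queue(
--     actions: Optional[Iterable[Dict[str, Any]]],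
-- ) -> Dict[str, List[Dict[str, Any]]]:
--     # Materialize once (the input may be a one-shot iterable), then three filters.
--     items = [dict(row) for row in actions or []]
--
--     def pol(item):
--         return str(item.get("policy") or "").strip()
--
--     return {
--         AUTO_ALLOWED: [i for i in items if pol(i) == AUTO_ALLOWED],
--         APPROVAL_REQUIRED: [i for i in items if pol(i) == APPROVAL_REQUIRED],
--         FORBIDDEN: [i for i in items if pol(i) not in (AUTO_ALLOWED, APPROVAL_REQUIRED)],
--     }
-- ===== Notes on version B (the rewrite author's own statement) =====
-- stated objective: alternative
-- what changed: Replaces the single classifying loop that appends into a pre-keyed dict with materializing the rows once and building the result dict from three independent filtered comprehensions (one scan per bucket).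
import Mathlib
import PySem

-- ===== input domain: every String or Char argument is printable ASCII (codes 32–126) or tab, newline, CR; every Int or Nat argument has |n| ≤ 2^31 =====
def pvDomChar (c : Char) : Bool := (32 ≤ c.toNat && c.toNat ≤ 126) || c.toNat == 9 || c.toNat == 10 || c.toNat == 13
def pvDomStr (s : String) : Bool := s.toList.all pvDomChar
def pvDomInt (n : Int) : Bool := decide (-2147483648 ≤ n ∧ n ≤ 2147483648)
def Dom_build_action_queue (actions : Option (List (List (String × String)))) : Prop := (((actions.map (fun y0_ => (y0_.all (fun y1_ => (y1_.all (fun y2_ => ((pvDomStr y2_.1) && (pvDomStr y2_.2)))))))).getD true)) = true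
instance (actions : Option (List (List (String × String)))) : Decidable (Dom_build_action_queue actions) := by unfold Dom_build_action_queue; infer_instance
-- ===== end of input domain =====

-- B builds the queue from three independent filtered passes over the materialized rows
-- instead of A's single classifying loop appending into a pre-keyed dict (alternative decomposition).


-- ===== PORT A =====
def AUTO_ALLOWED : String := "auto_allowed"
def APPROVAL_REQUIRED : String := "approval_required"
def FORBIDDEN : String := "forbidden"

-- `str(item.get("policy") or "").strip()`: values are strings, so `str(x or "")` is
-- `item.get("policy", "")` here (a present falsy value is the empty string itself) — exact.
def build_action_queue (actions : Option (List (List (String × String)))) : List (String × List (List (String × String))) :=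
  let queue : PySem.Dict String (List (List (String × String))) :=
    PySem.Dict.ofList [(AUTO_ALLOWED, []), (APPROVAL_REQUIRED, []), (FORBIDDEN, [])]
  let queue := (actions.getD []).foldl (fun q row =>
    let item := (PySem.Dict.ofList row).items           -- item = dict(row)
    let policy := PySem.Str.strip ((PySem.Dict.ofList row).getD "policy" "")
    if policy == AUTO_ALLOWED then q.modify AUTO_ALLOWED [] (· ++ [item])
    else if policy == APPROVAL_REQUIRED then q.modify APPROVAL_REQUIRED [] (· ++ [item])
    else q.modify FORBIDDEN [] (· ++ [item])) queue
  queue.items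

-- ===== PORT B =====
-- Source B's pol(item)
def pvPol (item : List (String × String)) : String :=
  PySem.Str.strip ((PySem.Dict.mk item).getD "policy" "")

def build_action_queue_alt (actions : Option (List (List (String × String)))) : List (String × List (List (String × String))) :=
  let items := (actions.getD []).map (fun row => (PySem.Dict.ofList row).items)
  [(AUTO_ALLOWED, items.filter (fun i => pvPol i == AUTO_ALLOWED)),
   (APPROVAL_REQUIRED, items.filter (fun i => pvPol i == APPROVAL_REQUIRED)),
   (FORBIDDEN, items.filter (fun i => !(pvPol i == AUTO_ALLOWED) && !(pvPol i == APPROVAL_REQUIRED)))]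

-- ===== PRECONDITION & SPEC =====
def Spec_build_action_queue (actions : Option (List (List (String × String)))) (out : List (String × List (List (String × String)))) : Prop := out = build_action_queue_alt actions
instance (actions : Option (List (List (String × String)))) (out : List (String × List (List (String × String)))) : Decidable (Spec_build_action_queue actions out) := by unfold Spec_build_action_queue; infer_instance

-- ===== CLAIM (what is proved, stated in full; the proofs are below) =====
def Claim_equal_build_action_queue : Prop := ∀ (actions : Option (List (List (String × String)))), Dom_build_action_queue actions → Spec_build_action_queue actions (build_action_queue actions)

-- ===== LEMMAS AND PROOFS =====
def pvItemOf (row : List (String × String)) : List (String × String) := (PySem.Dict.ofList row).items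

lemma pv_fold_eq (rows : List (List (String × String)))
    (a p f : List (List (String × String))) :
    rows.foldl (fun q row =>
      let item := (PySem.Dict.ofList row).items
      let policy := PySem.Str.strip ((PySem.Dict.ofList row).getD "policy" "")
      if policy == AUTO_ALLOWED then q.modify AUTO_ALLOWED [] (· ++ [item])
      else if policy == APPROVAL_REQUIRED then q.modify APPROVAL_REQUIRED [] (· ++ [item])
      else q.modify FORBIDDEN [] (· ++ [item]))
      (PySem.Dict.mk [(AUTO_ALLOWED, a), (APPROVAL_REQUIRED, p), (FORBIDDEN, f)]) =
    PySem.Dict.mk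
      [(AUTO_ALLOWED, a ++ (rows.filter (fun r => pvPol (pvItemOf r) == AUTO_ALLOWED)).map pvItemOf),
       (APPROVAL_REQUIRED, p ++ (rows.filter (fun r => pvPol (pvItemOf r) == APPROVAL_REQUIRED)).map pvItemOf),
       (FORBIDDEN, f ++ (rows.filter (fun r => !(pvPol (pvItemOf r) == AUTO_ALLOWED) && !(pvPol (pvItemOf r) == APPROVAL_REQUIRED))).map pvItemOf)] := by
  induction rows generalizing a p f with
  | nil => simp
  | cons r rows ih =>
    have hpol : PySem.Str.strip ((PySem.Dict.ofList r).getD "policy" "") = pvPol (pvItemOf r) := rfl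
    simp only [List.foldl_cons, List.filter_cons, hpol]
    by_cases h1 : pvPol (pvItemOf r) == AUTO_ALLOWED
    · have hstep : (PySem.Dict.mk [(AUTO_ALLOWED, a), (APPROVAL_REQUIRED, p), (FORBIDDEN, f)]).modify AUTO_ALLOWED [] (· ++ [(PySem.Dict.ofList r).items]) =
          PySem.Dict.mk [(AUTO_ALLOWED, a ++ [pvItemOf r]), (APPROVAL_REQUIRED, p), (FORBIDDEN, f)] := rfl
      have hA : pvPol (PySem.Dict.ofList r).items = AUTO_ALLOWED := by simpa [pvItemOf] using h1
      simp only [h1, if_pos, hstep, ih]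
      simp [pvItemOf, hA, AUTO_ALLOWED, APPROVAL_REQUIRED]
    · by_cases h2 : pvPol (pvItemOf r) == APPROVAL_REQUIRED
      · have hstep : (PySem.Dict.mk [(AUTO_ALLOWED, a), (APPROVAL_REQUIRED, p), (FORBIDDEN, f)]).modify APPROVAL_REQUIRED [] (· ++ [(PySem.Dict.ofList r).items]) =
            PySem.Dict.mk [(AUTO_ALLOWED, a), (APPROVAL_REQUIRED, p ++ [pvItemOf r]), (FORBIDDEN, f)] := rfl
        simp only [h1, h2, Bool.false_eq_true, if_false, if_pos, hstep, ih]
        simp [pvItemOf, AUTO_ALLOWED, APPROVAL_REQUIRED]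
      · have hstep : (PySem.Dict.mk [(AUTO_ALLOWED, a), (APPROVAL_REQUIRED, p), (FORBIDDEN, f)]).modify FORBIDDEN [] (· ++ [(PySem.Dict.ofList r).items]) =
            PySem.Dict.mk [(AUTO_ALLOWED, a), (APPROVAL_REQUIRED, p), (FORBIDDEN, f ++ [pvItemOf r])] := rfl
        simp only [h1, h2, Bool.false_eq_true, if_false, hstep, ih]
        simp [pvItemOf]

-- ===== VERDICT (by name: the statement is the Claim_ definition above) =====
theorem build_action_queue_spec : Claim_equal_build_action_queue := by
  intro actions _
  unfold Spec_build_action_queue build_action_queue build_action_queue_alt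
  have h0 : (PySem.Dict.ofList [(AUTO_ALLOWED, ([] : List (List (String × String)))), (APPROVAL_REQUIRED, []), (FORBIDDEN, [])]) =
      PySem.Dict.mk [(AUTO_ALLOWED, []), (APPROVAL_REQUIRED, []), (FORBIDDEN, [])] := rfl
  simp only [h0, pv_fold_eq]
  simp [List.filter_map, pvItemOf, Function.comp_def]
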